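-- pv_equiv track=rewrite | github.com/Joel-Barratt/Eukaryotpying-Python | DISTCOMP/Pycode_distcomp/Tools.py | findSameLociPattern
-- ===== SOURCE A (Python) =====
-- from itertools import combinations
--
-- def findPositionOfPattern(lociPattern):
--     position = []
--     for index in range(len(lociPattern)):
--         if lociPattern[index] == 'X':
--             position.append(index)
--     return position
--
-- def pairList(positionList):
--     combinationList = []
--     for index1 in range(len(positionList)):
--         length = index1 + 1
--         combi = combinations(positionList,length)
--         combinationList.append(list(combi))
--     return combinationList
--
-- def findSameLociPattern(valueSetLoci, listValueLoci):
--     # listValueLoci holds all loci patterns of all samples in the same loci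
--     # {pattern:{position tuple : count}}
--     lociPatternHold = {}
--     # value1 is a pattern in the pattern set
--     for value1 in valueSetLoci:
--         if str(value1) == str('0000XX0000'):
--             a = 0
--         value1Pos = findPositionOfPattern(value1)
--         keyTupleHolder = []
--         combinationList = pairList(value1Pos) # To do combination for all possible patterns
--         for atuple in combinationList: # combinationList 1st level: key
--             for tupleIndex in range(len(atuple)):
--                 keyTupleHolder.append(atuple[tupleIndex])
--         tupleCountDict = {}
--         for keyList in keyTupleHolder:
--             count_tuple = 0
--             value1List_key = {}
--             value1List_key[keyList] = []
--             for keyIndex in range(len(keyList)):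
--                 value1List_key[keyList].append(value1[keyList[keyIndex]])
--             for value2 in listValueLoci:
--                 value2List_key = {}
--                 value2List_key[keyList] = []
--                 for keyIndex in range(len(keyList)):
--                     value2List_key[keyList].append(value2[keyList[keyIndex]])
--                 if value1List_key == value2List_key:
--                     count_tuple += 1
--             tupleCountDict[keyList] = count_tuple
--         lociPatternHold[value1] = tupleCountDict
--     return lociPatternHold
-- ===== SOURCE B (Python) =====
-- from itertools import combinations
--
-- def findSameLociPattern(valueSetLoci, listValueLoci):
--     # One pass over the samples per pattern: tally each sample's X-signature (which of
--     # the pattern's X-positions the sample also has 'X' at), then score every position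
--     # subset against the tally instead of rescanning all samples for every subset.
--     result = {}
--     for pattern in valueSetLoci:
--         counts = {}
--         if 'X' in pattern:
--             positions = [i for i, c in enumerate(pattern) if c == 'X']
--             sigCounts = {}
--             for sample in listValueLoci:
--                 sig = tuple([p for p in positions if sample[p] == 'X'])
--                 sigCounts[sig] = sigCounts.get(sig, 0) + 1
--             for size in range(1, len(positions) + 1):
--                 for key in combinations(positions, size):
--                     counts[key] = sum(c for sig, c in sigCounts.items()
--                                       if all(p in sig for p in key))
--         result[pattern] = counts
--     return result
-- ===== Notes on version B (the rewrite author's own statement) =====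
-- stated objective: faster
-- what changed: Instead of rescanning every sample for each of the 2^n-1 X-position subsets, B makes one pass per pattern tallying each sample's X-signature into a counter and scores each subset by summing the counter entries whose signature contains it, skipping patterns with no 'X' entirely.
import Mathlib
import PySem

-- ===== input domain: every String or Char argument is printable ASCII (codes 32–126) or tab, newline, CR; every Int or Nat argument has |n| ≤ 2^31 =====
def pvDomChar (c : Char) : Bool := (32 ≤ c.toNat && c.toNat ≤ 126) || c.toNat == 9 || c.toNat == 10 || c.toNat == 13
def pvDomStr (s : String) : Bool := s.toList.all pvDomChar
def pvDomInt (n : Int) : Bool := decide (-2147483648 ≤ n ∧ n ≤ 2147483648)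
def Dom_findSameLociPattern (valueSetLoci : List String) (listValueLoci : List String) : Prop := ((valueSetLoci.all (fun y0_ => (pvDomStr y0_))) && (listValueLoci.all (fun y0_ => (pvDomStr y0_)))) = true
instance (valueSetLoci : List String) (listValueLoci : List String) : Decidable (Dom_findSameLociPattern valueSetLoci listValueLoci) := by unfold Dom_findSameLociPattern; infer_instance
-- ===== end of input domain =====

-- B replaces A's per-subset rescan of all samples by a one-pass signature tally per
-- pattern, then scores each subset against the tally (objective: faster).

-- ===== PORT A =====
def findPositionOfPattern (lociPattern : String) : List Int :=
  (PySem.List.pyRange 0 (PySem.Str.len lociPattern) 1).foldl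
    (fun position index =>
      if PySem.Str.pyGet? lociPattern index = some 'X' then position ++ [index] else position)
    []

-- 'combinations(positionList, length)' is itertools.combinations, ported as PySem.List.combinations
def pairList (positionList : List Int) : List (List (List Int)) :=
  (PySem.List.pyRange 0 (positionList.length : Int) 1).foldl
    (fun combinationList index1 =>
      combinationList ++ [PySem.List.combinations positionList (index1 + 1).toNat])
    []

-- the repeated inline block "d = {}; d[keyList] = []; for keyIndex in range(len(keyList)):
-- d[keyList].append(v[keyList[keyIndex]])" (built once for value1, once per value2)
def extractKeyDict (v : String) (keyList : List Int) : PySem.Dict (List Int) (List (Option Char)) :=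
  (PySem.List.pyRange 0 (keyList.length : Int) 1).foldl
    (fun d keyIndex =>
      d.modify keyList [] (fun l => l ++ [PySem.Str.pyGet? v (PySem.List.pyGetD keyList keyIndex 0)]))
    (PySem.Dict.empty.insert keyList [])

def findSameLociPattern (valueSetLoci : List String) (listValueLoci : List String) : List (String × List (List Int × Int)) :=
  (valueSetLoci.foldl
    (fun lociPatternHold value1 =>
      -- Python's "if str(value1) == str('0000XX0000'): a = 0" binds an unused local — no effect
      let value1Pos := findPositionOfPattern value1
      let combinationList := pairList value1Pos
      let keyTupleHolder := combinationList.foldl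
        (fun acc atuple =>
          (PySem.List.pyRange 0 (atuple.length : Int) 1).foldl
            (fun acc2 tupleIndex => acc2 ++ [PySem.List.pyGetD atuple tupleIndex []]) acc)
        ([] : List (List Int))
      let tupleCountDict := keyTupleHolder.foldl
        (fun d keyList =>
          let value1List_key := extractKeyDict value1 keyList
          -- both dicts carry the single key 'keyList', so Python's order-insensitive
          -- dict == is plain equality here
          let count_tuple : Int := listValueLoci.foldl
            (fun count value2 =>
              if value1List_key = extractKeyDict value2 keyList then count + 1 else count) 0
          d.insert keyList count_tuple)
        (PySem.Dict.empty : PySem.Dict (List Int) Int)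
      lociPatternHold.insert value1 tupleCountDict.items)
    (PySem.Dict.empty : PySem.Dict String (List (List Int × Int)))).items

-- ===== PORT B =====
def xPositions (pattern : String) : List Int :=
  ((PySem.List.enumerate pattern.toList 0).filter (fun p => p.2 == 'X')).map (·.1)

def sigOf (positions : List Int) (sample : String) : List Int :=
  positions.filter (fun p => PySem.Str.pyGet? sample p == some 'X')

def findSameLociPattern_alt (valueSetLoci : List String) (listValueLoci : List String) : List (String × List (List Int × Int)) :=
  (valueSetLoci.foldl
    (fun result pattern =>
      let counts : PySem.Dict (List Int) Int :=
        if PySem.Str.isIn "X" pattern then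
          let positions := xPositions pattern
          let sigCounts : PySem.Dict (List Int) Int := listValueLoci.foldl
            (fun d sample =>
              d.insert (sigOf positions sample) (d.getD (sigOf positions sample) 0 + 1))
            PySem.Dict.empty
          (PySem.List.pyRange 1 ((positions.length : Int) + 1) 1).foldl
            (fun c size =>
              (PySem.List.combinations positions size.toNat).foldl
                (fun c key =>
                  c.insert key (sigCounts.items.foldl
                    (fun acc p => acc + (if key.all (fun q => decide (q ∈ p.1)) then p.2 else 0)) 0))
                c)
            (PySem.Dict.empty : PySem.Dict (List Int) Int)
        else PySem.Dict.empty
      result.insert pattern counts.items)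
    (PySem.Dict.empty : PySem.Dict String (List (List Int × Int)))).items

-- ===== PRECONDITION & SPEC =====
-- Pre_ excludes exactly the inputs where the Python A raises IndexError: some pattern has
-- an 'X' at an index at which some sample string is too short (B raises there as well).
def Pre_findSameLociPattern (valueSetLoci : List String) (listValueLoci : List String) : Prop :=
  ∀ s ∈ valueSetLoci, ∀ i ∈ List.range s.toList.length,
    s.toList.getD i ' ' = 'X' → ∀ t ∈ listValueLoci, i < t.toList.length
instance (valueSetLoci : List String) (listValueLoci : List String) : Decidable (Pre_findSameLociPattern valueSetLoci listValueLoci) := by unfold Pre_findSameLociPattern; infer_instance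

def pvWitness_findSameLociPattern : List String × List String := (["0X0", "XXX"], ["0XX", "XX0"])

def Spec_findSameLociPattern (valueSetLoci : List String) (listValueLoci : List String) (out : List (String × List (List Int × Int))) : Prop := out = findSameLociPattern_alt valueSetLoci listValueLoci
instance (valueSetLoci : List String) (listValueLoci : List String) (out : List (String × List (List Int × Int))) : Decidable (Spec_findSameLociPattern valueSetLoci listValueLoci out) := by unfold Spec_findSameLociPattern; infer_instance

-- ===== CLAIM (what is proved, stated in full; the proofs are below) =====
def Claim_equal_findSameLociPattern : Prop := ∀ (valueSetLoci : List String) (listValueLoci : List String), Dom_findSameLociPattern valueSetLoci listValueLoci → Pre_findSameLociPattern valueSetLoci listValueLoci → Spec_findSameLociPattern valueSetLoci listValueLoci (findSameLociPattern valueSetLoci listValueLoci)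

-- ===== LEMMAS AND PROOFS =====

-- A's position loop computes B's xPositions
theorem findPositionOfPattern_eq (v : String) : findPositionOfPattern v = xPositions v := by
  rw [findPositionOfPattern, PySem.List.foldl_append_ite_eq_filter]
  rw [xPositions, PySem.List.enumerate_eq_map_pyRange (d := ' ')]
  rw [List.filter_map, List.map_map]
  simp only [Function.comp_def, List.map_id']
  rw [List.nil_append]
  apply List.filter_congr
  intro i hi
  rw [PySem.List.mem_pyRange_one] at hi
  obtain ⟨k, rfl⟩ : ∃ k : Nat, i = (k : Int) := ⟨i.toNat, by omega⟩
  have hlt : k < v.toList.length := by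
    have := hi.2; rw [PySem.Str.len_eq] at this; exact_mod_cast this
  simp [PySem.Str.pyGet?, PySem.List.pyGet?_natCast, PySem.List.pyGetD_natCast,
    List.getElem?_eq_getElem hlt, List.getD_eq_getElem?_getD, Bool.beq_eq_decide_eq]

-- every collected position is an in-range 'X' index of the pattern
theorem mem_xPositions (v : String) (p : Int) (hp : p ∈ xPositions v) :
    PySem.Str.pyGet? v p = some 'X' := by
  rw [xPositions] at hp
  simp only [List.mem_map, List.mem_filter] at hp
  obtain ⟨⟨q, hq⟩, hXq, rfl⟩ := hp
  rw [PySem.List.mem_enumerate_iff] at hXq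
  obtain ⟨⟨k, hk, hpair⟩, hX⟩ := hXq
  simp at hpair
  obtain ⟨h1, h2⟩ := hpair
  subst h1; subst h2
  simp_all [PySem.Str.pyGet?, PySem.List.pyGet?_natCast, List.getElem?_eq_getElem hk]

-- a 'modify' at the unique key of a singleton dict rewrites its value in place
theorem modify_singleton {κ : Type} [BEq κ] [LawfulBEq κ] (K : κ) (acc : List (Option Char))
    (g : List (Option Char) → List (Option Char)) :
    (PySem.Dict.empty.insert K acc).modify K [] g = PySem.Dict.empty.insert K (g acc) := by
  simp [PySem.Dict.modify, PySem.Dict.getD_insert_self, PySem.Dict.insert_insert_self]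

-- the extraction loop appends exactly the mapped lookups
theorem extract_fold (g : Int → Option Char) (K : List Int) (l : List Int) (acc : List (Option Char)) :
    l.foldl (fun d x => d.modify K [] (fun a => a ++ [g x])) (PySem.Dict.empty.insert K acc)
      = PySem.Dict.empty.insert K (acc ++ l.map g) := by
  induction l generalizing acc with
  | nil => simp
  | cons x t ih => rw [List.foldl_cons, modify_singleton]; rw [ih]; simp

-- the extraction dict is a singleton mapping keyList to the list of looked-up chars
theorem extractKeyDict_eq (v : String) (keyList : List Int) :
    extractKeyDict v keyList
      = PySem.Dict.empty.insert keyList (keyList.map (fun p => PySem.Str.pyGet? v p)) := by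
  rw [extractKeyDict]
  refine Eq.trans (PySem.List.foldl_pyRange_zero_pyGetD' keyList 0
      (fun d x => d.modify keyList [] (fun l => l ++ [PySem.Str.pyGet? v x]))
      (PySem.Dict.empty.insert keyList [])) ?_
  simpa using extract_fold (fun p => PySem.Str.pyGet? v p) keyList keyList []

-- disjoint additivity of countP
theorem countP_or_disjoint {α : Type} (l : List α) (p r : α → Bool)
    (h : ∀ a, ¬(p a = true ∧ r a = true)) :
    l.countP (fun a => p a || r a) = l.countP p + l.countP r := by
  induction l with
  | nil => simp
  | cons x t ih =>
    simp only [List.countP_cons, ih]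
    have := h x
    cases hp : p x <;> cases hr : r x <;> simp_all <;> omega

-- summing 0/1-gated counts over a Nodup covering list counts the underlying list
theorem sum_over_cover {α : Type} [BEq α] [LawfulBEq α] [DecidableEq α] (ms : List α) (q : α → Bool)
    (L : List α) (hnd : L.Nodup) :
    (L.map (fun s => if q s then (ms.count s : Int) else 0)).sum
      = ((ms.countP (fun a => q a && decide (a ∈ L)) : Nat) : Int) := by
  induction L with
  | nil => simp
  | cons s L' ih =>
    have hs : s ∉ L' := (List.nodup_cons.mp hnd).1
    have hnd' := (List.nodup_cons.mp hnd).2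
    rw [List.map_cons, List.sum_cons, ih hnd']
    have hsplit : ms.countP (fun a => q a && decide (a ∈ s :: L'))
        = ms.countP (fun a => q a && (a == s)) + ms.countP (fun a => q a && decide (a ∈ L')) := by
      rw [← countP_or_disjoint]
      · apply List.countP_congr
        intro a _
        by_cases hqa : q a = true <;> by_cases has : a = s <;> simp_all
      · intro a ⟨h1, h2⟩
        simp at h1 h2
        exact hs (h1.2 ▸ h2.2)
    rw [hsplit]
    have hfirst : ms.countP (fun a => q a && (a == s)) = if q s then ms.count s else 0 := by
      by_cases hq : q s = true
      · rw [if_pos hq, List.count_eq_countP]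
        apply List.countP_congr
        intro a _
        constructor
        · intro hh; simp_all
        · intro hh; simp at hh; subst hh; simp [hq]
      · rw [if_neg hq]
        apply List.countP_eq_zero.mpr
        intro a _ hh
        simp at hh
        exact hq (hh.2 ▸ hh.1)
    rw [hfirst]
    push_cast
    split <;> ring

-- per key: A's rescan of all samples equals B's weighted sum over the signature counter
theorem inner_eq (v1 : String) (listValueLoci : List String) (key : List Int)
    (hkey : ∀ p ∈ key, p ∈ xPositions v1) :
    (listValueLoci.foldl
      (fun count value2 =>
        if extractKeyDict v1 key = extractKeyDict value2 key then count + 1 else count) (0 : Int))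
      = (PySem.Dict.counter (listValueLoci.map (sigOf (xPositions v1)))).items.foldl
          (fun acc p => acc + (if key.all (fun q => decide (q ∈ p.1)) then p.2 else 0)) 0 := by
  rw [PySem.List.foldl_ite_add_one (fun value2 => extractKeyDict v1 key = extractKeyDict value2 key) listValueLoci 0]
  rw [PySem.Dict.items_counter]
  have hfold := PySem.List.foldl_add
    ((PySem.Set.ofList (listValueLoci.map (sigOf (xPositions v1)))).map
      (fun k => (k, ((listValueLoci.map (sigOf (xPositions v1))).count k : Int))))
    (fun p => (if key.all (fun q => decide (q ∈ p.1)) then p.2 else 0)) 0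
  rw [hfold]
  rw [List.map_map]
  have hcomp : ((fun p : List Int × Int => if key.all (fun q => decide (q ∈ p.1)) then p.2 else 0) ∘
      fun k => (k, ((listValueLoci.map (sigOf (xPositions v1))).count k : Int)))
      = fun s => if key.all (fun q => decide (q ∈ s)) then ((listValueLoci.map (sigOf (xPositions v1))).count s : Int) else 0 := by
    funext s; rfl
  rw [hcomp]
  have hsum := sum_over_cover (listValueLoci.map (sigOf (xPositions v1)))
    (fun s => key.all (fun q => decide (q ∈ s)))
    (PySem.Set.ofList (listValueLoci.map (sigOf (xPositions v1)))) (PySem.Set.nodup_ofList _)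
  beta_reduce at hsum
  rw [hsum]
  have hcov : (listValueLoci.map (sigOf (xPositions v1))).countP
      (fun a => key.all (fun q => decide (q ∈ a)) && decide (a ∈ PySem.Set.ofList (listValueLoci.map (sigOf (xPositions v1)))))
      = (listValueLoci.map (sigOf (xPositions v1))).countP (fun a => key.all (fun q => decide (q ∈ a))) := by
    apply List.countP_congr
    intro a ha
    simp [PySem.Set.mem_ofList, ha]
  rw [hcov, List.countP_map]
  congr 1
  norm_cast
  apply List.countP_congr
  intro v2 _
  have h1 : extractKeyDict v1 key = extractKeyDict v2 key
      ↔ ∀ p ∈ key, PySem.Str.pyGet? v2 p = some 'X' := by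
    rw [extractKeyDict_eq, extractKeyDict_eq, PySem.Dict.ext_iff,
        PySem.Dict.items_insert_of_not_contains _ _ (by simp [PySem.Dict.contains_empty]),
        PySem.Dict.items_insert_of_not_contains _ _ (by simp [PySem.Dict.contains_empty])]
    simp only [PySem.Dict.empty, List.nil_append, List.cons.injEq, Prod.mk.injEq, and_true, true_and]
    rw [List.map_inj_left]
    constructor
    · intro h p hp; rw [← h p hp, mem_xPositions v1 p (hkey p hp)]
    · intro h p hp; rw [h p hp, mem_xPositions v1 p (hkey p hp)]
  have h2 : ((fun a => key.all fun q => decide (q ∈ a)) ∘ sigOf (xPositions v1)) v2 = true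
      ↔ ∀ p ∈ key, PySem.Str.pyGet? v2 p = some 'X' := by
    simp only [Function.comp_apply, List.all_eq_true, decide_eq_true_eq, sigOf, List.mem_filter]
    constructor
    · intro h p hp; have := (h p hp).2; simpa using this
    · intro h p hp; exact ⟨hkey p hp, by simpa [PySem.Str.pyGet?] using h p hp⟩
  simp only [decide_eq_true_eq]
  exact h1.trans h2.symm

-- A's flattened key list is the size-ordered flatMap of combinations B iterates
theorem keyflat (P : List Int) :
    (pairList P).foldl
      (fun acc atuple =>
        (PySem.List.pyRange 0 (atuple.length : Int) 1).foldl
          (fun acc2 tupleIndex => acc2 ++ [PySem.List.pyGetD atuple tupleIndex []]) acc)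
      ([] : List (List Int))
    = (PySem.List.pyRange 1 ((P.length : Int) + 1) 1).flatMap
        (fun size => PySem.List.combinations P size.toNat) := by
  have h1 : ∀ (init : List (List Int)) (atuple : List (List Int)),
      (PySem.List.pyRange 0 (atuple.length : Int) 1).foldl
        (fun acc2 tupleIndex => acc2 ++ [PySem.List.pyGetD atuple tupleIndex []]) init
      = init ++ atuple := by
    intro init atuple
    refine Eq.trans (PySem.List.foldl_pyRange_zero_pyGetD' atuple []
      (fun a x => a ++ [x]) init) ?_
    exact PySem.List.foldl_append_singleton_eq_self atuple init
  refine Eq.trans (PySem.List.foldl_congr_mem (pairList P) _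
    (fun acc atuple => acc ++ atuple) [] (fun acc atuple _ => h1 acc atuple)) ?_
  rw [PySem.List.foldl_append_eq_flatten]
  rw [List.nil_append, pairList]
  rw [PySem.List.foldl_append_singleton_eq_map]
  rw [List.nil_append, ← List.flatMap_def]
  rw [PySem.List.pyRange_one 1 ((P.length : Int) + 1), PySem.List.pyRange_one 0 (P.length : Int)]
  rw [List.flatMap_map, List.flatMap_map]
  have hr : ((P.length : Int) - 0).toNat = ((P.length : Int) + 1 - 1).toNat := by omega
  rw [hr]
  apply List.flatMap_congr
  intro k hk
  congr 1
  omega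

-- a pattern without the substring 'X' has no X-positions
theorem xPositions_eq_nil_of_not_isIn (v : String) (h : ¬ PySem.Str.isIn "X" v) :
    xPositions v = [] := by
  rw [xPositions, List.map_eq_nil_iff, List.filter_eq_nil_iff]
  intro p hmem
  simp only [beq_iff_eq]
  intro hc
  apply h
  rw [PySem.Str.isIn_iff_infix]
  have hcmem : p.2 ∈ v.toList := by
    have := PySem.List.map_snd_enumerate v.toList 0
    exact this ▸ List.mem_map_of_mem hmem
  rw [hc] at hcmem
  obtain ⟨l1, l2, heq⟩ := List.append_of_mem hcmem
  exact ⟨l1, l2, by simp [heq]⟩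

-- per pattern: A's inner dict equals B's inner dict
theorem pattern_eq (v1 : String) (listValueLoci : List String) :
    (let value1Pos := findPositionOfPattern v1
     let combinationList := pairList value1Pos
     let keyTupleHolder := combinationList.foldl
       (fun acc atuple =>
         (PySem.List.pyRange 0 (atuple.length : Int) 1).foldl
           (fun acc2 tupleIndex => acc2 ++ [PySem.List.pyGetD atuple tupleIndex []]) acc)
       ([] : List (List Int))
     keyTupleHolder.foldl
       (fun d keyList =>
         let value1List_key := extractKeyDict v1 keyList
         let count_tuple : Int := listValueLoci.foldl
           (fun count value2 =>
             if value1List_key = extractKeyDict value2 keyList then count + 1 else count) 0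
         d.insert keyList count_tuple)
       (PySem.Dict.empty : PySem.Dict (List Int) Int))
    = (if PySem.Str.isIn "X" v1 then
         let positions := xPositions v1
         let sigCounts : PySem.Dict (List Int) Int := listValueLoci.foldl
           (fun d sample =>
             d.insert (sigOf positions sample) (d.getD (sigOf positions sample) 0 + 1))
           PySem.Dict.empty
         (PySem.List.pyRange 1 ((positions.length : Int) + 1) 1).foldl
           (fun c size =>
             (PySem.List.combinations positions size.toNat).foldl
               (fun c key =>
                 c.insert key (sigCounts.items.foldl
                   (fun acc p => acc + (if key.all (fun q => decide (q ∈ p.1)) then p.2 else 0)) 0))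
               c)
           (PySem.Dict.empty : PySem.Dict (List Int) Int)
       else PySem.Dict.empty) := by
  by_cases hX : PySem.Str.isIn "X" v1
  case neg =>
    have hnil : xPositions v1 = [] := xPositions_eq_nil_of_not_isIn v1 hX
    simp only [findPositionOfPattern_eq, hX]
    rw [keyflat (xPositions v1), hnil]
    simp [PySem.List.pyRange_one_eq_nil]
  simp only [hX, if_true]
  simp only [findPositionOfPattern_eq]
  rw [keyflat (xPositions v1)]
  have hsig : listValueLoci.foldl
      (fun d sample =>
        d.insert (sigOf (xPositions v1) sample) (d.getD (sigOf (xPositions v1) sample) 0 + 1))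
      PySem.Dict.empty
      = PySem.Dict.counter (listValueLoci.map (sigOf (xPositions v1))) := by
    rw [← PySem.Dict.foldl_insert_getD_add_one_eq_counter, List.foldl_map]
  rw [hsig]
  rw [← List.foldl_flatMap]
  apply PySem.List.foldl_congr_mem
  intro d keyList hmem
  rw [List.mem_flatMap] at hmem
  obtain ⟨size, _, hc⟩ := hmem
  have hsub : keyList.Sublist (xPositions v1) := PySem.List.sublist_of_mem_combinations hc
  have hkey : ∀ p ∈ keyList, p ∈ xPositions v1 := fun p hp => hsub.subset hp
  rw [inner_eq v1 listValueLoci keyList hkey]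

-- ===== VERDICT (by name: the statement is the Claim_ definition above) =====
theorem findSameLociPattern_spec : Claim_equal_findSameLociPattern := by
  intro valueSetLoci listValueLoci _ _
  unfold Spec_findSameLociPattern findSameLociPattern findSameLociPattern_alt
  refine congrArg PySem.Dict.items ?_
  apply PySem.List.foldl_congr_mem
  intro acc v1 _
  exact congrArg (fun d => acc.insert v1 (PySem.Dict.items d)) (pattern_eq v1 listValueLoci)
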